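-- pv_equiv track=rewrite | github.com/ziyadhr99/ProjetIA | projetIA.py | parametre
-- ===== SOURCE A (Python) =====
-- def parametre(dim_x,dim_y,bloc_x,bloc_y):
--             i = int(dim_x/bloc_x)
--             j = int(dim_y/bloc_y)
--             lx = bloc_x*[i]
--             ly = bloc_y*[j]
--             x = bloc_x*[0]
--             y = bloc_y*[0]
--             if dim_x%bloc_x > 0 :
--                 for k in range(dim_x%bloc_x):
--                     x[k] = 1
--             if dim_y%bloc_y > 0 :
--                 for k in range(dim_y%bloc_y):
--                     y[k] = 1
--             for k in range(bloc_x):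
--                 lx[k] = lx[k] + x[k]
--             for k in range(bloc_y):
--                 ly[k] = ly[k] + y[k]
--             for k in range(1,bloc_x):
--                 lx[k] += lx[k-1]
--             for k in range(1,bloc_y):
--                 ly[k] += ly[k-1]
--             return [0]+lx,[0]+ly
-- ===== SOURCE B (Python) =====
-- def parametre(dim_x, dim_y, bloc_x, bloc_y):
--     # closed form: the m-th cumulative boundary is m*i plus the number of bumped blocks below m
--     i, r_x = int(dim_x / bloc_x), dim_x % bloc_x
--     j, r_y = int(dim_y / bloc_y), dim_y % bloc_y
--     return ([0] + [m * i + min(m, r_x) for m in range(1, bloc_x + 1)],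
--             [0] + [m * j + min(m, r_y) for m in range(1, bloc_y + 1)])
-- ===== Notes on version B (the rewrite author's own statement) =====
-- stated objective: simpler
-- what changed: Replaces A's six loops over four scratch lists (size lists, remainder flags, elementwise add, two cumulative-sum passes) by one closed-form comprehension per axis: the m-th boundary is m*i + min(m, r).
import Mathlib
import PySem

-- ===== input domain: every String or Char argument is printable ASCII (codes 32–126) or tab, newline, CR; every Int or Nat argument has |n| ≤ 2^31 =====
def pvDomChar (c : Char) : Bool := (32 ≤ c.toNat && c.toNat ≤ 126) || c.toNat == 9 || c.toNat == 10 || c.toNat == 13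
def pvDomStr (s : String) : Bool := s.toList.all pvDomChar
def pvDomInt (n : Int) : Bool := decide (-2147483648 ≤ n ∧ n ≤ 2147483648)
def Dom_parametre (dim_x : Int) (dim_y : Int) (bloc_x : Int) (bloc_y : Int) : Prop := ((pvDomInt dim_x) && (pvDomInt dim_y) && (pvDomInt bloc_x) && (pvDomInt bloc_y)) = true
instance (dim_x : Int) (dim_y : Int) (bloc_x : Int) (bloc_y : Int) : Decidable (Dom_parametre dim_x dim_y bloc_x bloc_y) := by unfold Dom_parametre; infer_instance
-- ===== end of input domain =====

-- B replaces A's six loops over four scratch lists by the closed form boundary(m) = m*i + min(m, r) per axis (simpler; same cost).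

-- ===== PORT A =====
-- int(dim/bloc) is Python float division truncated toward zero; for |arguments| ≤ 2^31 (Dom) this equals
-- Int.tdiv exactly (the true quotient would need |dim| ≥ ~2^52 for the float to round across an integer).
-- list indices in every loop are nonnegative and in range, so pySetD/pyGetD are exact here.
def parametre (dim_x : Int) (dim_y : Int) (bloc_x : Int) (bloc_y : Int) : List Int × List Int :=
  let i := Int.tdiv dim_x bloc_x
  let j := Int.tdiv dim_y bloc_y
  let lx := PySem.List.pyRepeat [i] bloc_x
  let ly := PySem.List.pyRepeat [j] bloc_y
  let x := PySem.List.pyRepeat [(0 : Int)] bloc_x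
  let y := PySem.List.pyRepeat [(0 : Int)] bloc_y
  let x := if PySem.Int.mod dim_x bloc_x > 0 then
      (PySem.List.pyRange 0 (PySem.Int.mod dim_x bloc_x) 1).foldl
        (fun l k => PySem.List.pySetD l k 1) x
    else x
  let y := if PySem.Int.mod dim_y bloc_y > 0 then
      (PySem.List.pyRange 0 (PySem.Int.mod dim_y bloc_y) 1).foldl
        (fun l k => PySem.List.pySetD l k 1) y
    else y
  let lx := (PySem.List.pyRange 0 bloc_x 1).foldl
      (fun l k => PySem.List.pySetD l k (PySem.List.pyGetD l k 0 + PySem.List.pyGetD x k 0)) lx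
  let ly := (PySem.List.pyRange 0 bloc_y 1).foldl
      (fun l k => PySem.List.pySetD l k (PySem.List.pyGetD l k 0 + PySem.List.pyGetD y k 0)) ly
  let lx := (PySem.List.pyRange 1 bloc_x 1).foldl
      (fun l k => PySem.List.pySetD l k (PySem.List.pyGetD l k 0 + PySem.List.pyGetD l (k - 1) 0)) lx
  let ly := (PySem.List.pyRange 1 bloc_y 1).foldl
      (fun l k => PySem.List.pySetD l k (PySem.List.pyGetD l k 0 + PySem.List.pyGetD l (k - 1) 0)) ly
  ([0] ++ lx, [0] ++ ly)

-- ===== PORT B =====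
def parametre_alt (dim_x : Int) (dim_y : Int) (bloc_x : Int) (bloc_y : Int) : List Int × List Int :=
  let i := Int.tdiv dim_x bloc_x      -- int(dim_x / bloc_x), exact on Dom as above
  let r_x := PySem.Int.mod dim_x bloc_x
  let j := Int.tdiv dim_y bloc_y
  let r_y := PySem.Int.mod dim_y bloc_y
  ([0] ++ (PySem.List.pyRange 1 (bloc_x + 1) 1).map (fun m => m * i + min m r_x),
   [0] ++ (PySem.List.pyRange 1 (bloc_y + 1) 1).map (fun m => m * j + min m r_y))

-- ===== PRECONDITION & SPEC =====
-- Pre_ excludes exactly bloc_x = 0 or bloc_y = 0, where Python A raises ZeroDivisionError (as does B).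
def Pre_parametre (dim_x : Int) (dim_y : Int) (bloc_x : Int) (bloc_y : Int) : Prop :=
  bloc_x ≠ 0 ∧ bloc_y ≠ 0
instance (dim_x : Int) (dim_y : Int) (bloc_x : Int) (bloc_y : Int) : Decidable (Pre_parametre dim_x dim_y bloc_x bloc_y) := by unfold Pre_parametre; infer_instance
def pvWitness_parametre : Int × Int × Int × Int := (10, 7, 3, 2)

def Spec_parametre (dim_x : Int) (dim_y : Int) (bloc_x : Int) (bloc_y : Int) (out : List Int × List Int) : Prop := out = parametre_alt dim_x dim_y bloc_x bloc_y
instance (dim_x : Int) (dim_y : Int) (bloc_x : Int) (bloc_y : Int) (out : List Int × List Int) : Decidable (Spec_parametre dim_x dim_y bloc_x bloc_y out) := by unfold Spec_parametre; infer_instance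

-- ===== CLAIM (what is proved, stated in full; the proofs are below) =====
def Claim_equal_parametre : Prop := ∀ (dim_x : Int) (dim_y : Int) (bloc_x : Int) (bloc_y : Int), Dom_parametre dim_x dim_y bloc_x bloc_y → Pre_parametre dim_x dim_y bloc_x bloc_y → Spec_parametre dim_x dim_y bloc_x bloc_y (parametre dim_x dim_y bloc_x bloc_y)

-- ===== LEMMAS AND PROOFS =====

-- A's three loop stages over one axis, and both pipelines restricted to one axis.
def pvStage1 (r : Int) (x : List Int) : List Int :=
  (PySem.List.pyRange 0 r 1).foldl (fun l k => PySem.List.pySetD l k 1) x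

lemma foldl_pySetD_length (g : List Int → Int → Int) :
    ∀ (ks : List Int) (l : List Int),
      (ks.foldl (fun l k => PySem.List.pySetD l k (g l k)) l).length = l.length := by
  intro ks
  induction ks with
  | nil => intro l; rfl
  | cons k ks ih => intro l; rw [List.foldl_cons, ih, PySem.List.length_pySetD]

lemma stage1_len (r : Int) (l : List Int) : (pvStage1 r l).length = l.length :=
  foldl_pySetD_length (fun _ _ => 1) _ l

lemma stage1_getElem (l : List Int) :
    ∀ (m : Nat), m ≤ l.length → ∀ k (hk : k < l.length),
      (pvStage1 (m : Int) l)[k]'(by rw [stage1_len]; exact hk) = if k < m then 1 else l[k] := by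
  intro m
  induction m with
  | zero =>
      intro _ k hk
      simp [pvStage1, PySem.List.pyRange_one_eq_nil (by omega : (0:Int) ≤ 0)]
  | succ m ih =>
      intro hm k hk
      have hrange : PySem.List.pyRange 0 ((m:Int)+1) 1
          = PySem.List.pyRange 0 (m:Int) 1 ++ [(m:Int)] :=
        PySem.List.pyRange_one_succ_right (by omega)
      have : pvStage1 ((m+1 : Nat) : Int) l
          = PySem.List.pySetD (pvStage1 (m : Int) l) (m : Int) 1 := by
        unfold pvStage1
        push_cast
        rw [hrange, List.foldl_append]
        rfl
      rw [List.getElem_of_eq this]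
      simp only [PySem.List.pySetD_natCast, List.getElem_set]
      by_cases h : m = k
      · simp [h]
      · rw [if_neg h, ih (by omega) k hk]
        by_cases h2 : k < m
        · rw [if_pos h2, if_pos (by omega)]
        · rw [if_neg h2, if_neg (by omega)]

def pvStage2 (x : List Int) (b : Int) (l : List Int) : List Int :=
  (PySem.List.pyRange 0 b 1).foldl
    (fun l k => PySem.List.pySetD l k (PySem.List.pyGetD l k 0 + PySem.List.pyGetD x k 0)) l

lemma stage2_len (x : List Int) (b : Int) (l : List Int) : (pvStage2 x b l).length = l.length :=
  foldl_pySetD_length (fun l k => PySem.List.pyGetD l k 0 + PySem.List.pyGetD x k 0) _ l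

lemma stage2_getElem (x l : List Int) :
    ∀ (t : Nat), t ≤ l.length → ∀ k (hk : k < l.length),
      (pvStage2 x (t : Int) l)[k]'(by rw [stage2_len]; exact hk)
        = if k < t then l[k] + x.getD k 0 else l[k] := by
  intro t
  induction t with
  | zero =>
      intro _ k hk
      simp [pvStage2, PySem.List.pyRange_one_eq_nil (by omega : (0:Int) ≤ 0)]
  | succ t ih =>
      intro ht k hk
      have hrange : PySem.List.pyRange 0 ((t:Int)+1) 1
          = PySem.List.pyRange 0 (t:Int) 1 ++ [(t:Int)] :=
        PySem.List.pyRange_one_succ_right (by omega)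
      have hstep : pvStage2 x ((t+1 : Nat) : Int) l
          = PySem.List.pySetD (pvStage2 x (t : Int) l) (t : Int)
              (PySem.List.pyGetD (pvStage2 x (t : Int) l) (t : Int) 0 + PySem.List.pyGetD x (t : Int) 0) := by
        unfold pvStage2
        push_cast
        rw [hrange, List.foldl_append]
        rfl
      have hlen : (pvStage2 x (t : Int) l).length = l.length := stage2_len x _ l
      have hmid : PySem.List.pyGetD (pvStage2 x (t : Int) l) (t : Int) 0
          = (pvStage2 x (t : Int) l)[t]'(by omega) := by
        rw [PySem.List.pyGetD_natCast, List.getD_eq_getElem _ _ (by omega)]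
      rw [List.getElem_of_eq hstep]
      simp only [PySem.List.pySetD_natCast, List.getElem_set]
      have h1 : (pvStage2 x (t:Int) l)[t]'(by omega) = l[t]'(by omega) :=
        (ih (by omega) t (by omega)).trans (by rw [if_neg (by omega)])
      simp only [hmid, h1]
      by_cases h : t = k
      · subst h
        rw [if_pos rfl, if_pos (by omega), PySem.List.pyGetD_natCast]
      · rw [if_neg h, ih (by omega) k hk]
        by_cases h2 : k < t
        · rw [if_pos h2, if_pos (by omega)]
        · rw [if_neg h2, if_neg (by omega)]

def pvStage3 (b : Int) (l : List Int) : List Int :=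
  (PySem.List.pyRange 1 b 1).foldl
    (fun l k => PySem.List.pySetD l k (PySem.List.pyGetD l k 0 + PySem.List.pyGetD l (k - 1) 0)) l

lemma stage3_len (b : Int) (l : List Int) : (pvStage3 b l).length = l.length :=
  foldl_pySetD_length (fun l k => PySem.List.pyGetD l k 0 + PySem.List.pyGetD l (k - 1) 0) _ l

lemma stage3_getElem (i r : Int) (hr : 0 ≤ r) (l : List Int)
    (hl : ∀ k (hk : k < l.length), l[k] = i + (if (k : Int) < r then 1 else 0)) :
    ∀ (t : Nat), 1 ≤ t → t ≤ l.length → ∀ k (hk : k < l.length),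
      (pvStage3 (t : Int) l)[k]'(by rw [stage3_len]; exact hk)
        = if k < t then ((k : Int) + 1) * i + min ((k : Int) + 1) r else l[k] := by
  intro t ht
  induction t, ht using Nat.le_induction with
  | base =>
      intro _ k hk
      have hnil : PySem.List.pyRange 1 ((1:Nat) : Int) 1 = [] :=
        PySem.List.pyRange_one_eq_nil (by norm_num)
      have hres : pvStage3 ((1:Nat) : Int) l = l := by unfold pvStage3; rw [hnil]; rfl
      rw [List.getElem_of_eq hres]
      by_cases h : k < 1
      · have hk0 : k = 0 := by omega
        subst hk0
        rw [if_pos h, hl 0 hk]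
        push_cast
        by_cases h2 : (0 : Int) < r
        · rw [if_pos h2, min_eq_left (by omega)]; ring
        · have hr0 : r = 0 := by omega
          subst hr0
          rw [if_neg h2, min_eq_right (by omega)]; ring
      · rw [if_neg h]
  | succ t ht ih =>
      intro htl k hk
      have hrange : PySem.List.pyRange 1 ((t:Int)+1) 1
          = PySem.List.pyRange 1 (t:Int) 1 ++ [(t:Int)] :=
        PySem.List.pyRange_one_succ_right (by omega)
      have hstep : pvStage3 ((t+1 : Nat) : Int) l
          = PySem.List.pySetD (pvStage3 (t : Int) l) (t : Int)
              (PySem.List.pyGetD (pvStage3 (t : Int) l) (t : Int) 0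
                + PySem.List.pyGetD (pvStage3 (t : Int) l) ((t : Int) - 1) 0) := by
        unfold pvStage3
        push_cast
        rw [hrange, List.foldl_append]
        rfl
      have hlen : (pvStage3 (t : Int) l).length = l.length := stage3_len _ l
      have hcast : ((t : Int) - 1) = ((t - 1 : Nat) : Int) := by omega
      have hcur : PySem.List.pyGetD (pvStage3 (t : Int) l) (t : Int) 0 = l[t]'(by omega) := by
        rw [PySem.List.pyGetD_natCast, List.getD_eq_getElem _ _ (by omega),
          ih (by omega) t (by omega), if_neg (by omega)]
      have hprev : PySem.List.pyGetD (pvStage3 (t : Int) l) ((t : Int) - 1) 0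
          = (t : Int) * i + min (t : Int) r := by
        rw [hcast, PySem.List.pyGetD_natCast, List.getD_eq_getElem _ _ (by omega),
          ih (by omega) (t-1) (by omega), if_pos (by omega)]
        have : ((t - 1 : Nat) : Int) + 1 = (t : Int) := by omega
        rw [this]
      rw [List.getElem_of_eq hstep]
      simp only [PySem.List.pySetD_natCast, List.getElem_set, hcur, hprev]
      by_cases h : t = k
      · subst h
        rw [if_pos rfl, if_pos (by omega), hl t (by omega)]
        by_cases h2 : (t : Int) < r
        · rw [if_pos h2, min_eq_left (by omega), min_eq_left (by omega)]; ring
        · rw [if_neg h2, min_eq_right (by omega), min_eq_right (by omega)]; ring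
      · rw [if_neg h, ih (by omega) k hk]
        by_cases h2 : k < t
        · rw [if_pos h2, if_pos (by omega)]
        · rw [if_neg h2, if_neg (by omega)]

lemma foldl_pySetD_nil (g : List Int → Int → Int) (ks : List Int) :
    ks.foldl (fun l k => PySem.List.pySetD l k (g l k)) ([] : List Int) = [] :=
  List.eq_nil_of_length_eq_zero (foldl_pySetD_length g ks [])

def pvAxisA (d b : Int) : List Int :=
  pvStage3 b (pvStage2
    (if PySem.Int.mod d b > 0 then pvStage1 (PySem.Int.mod d b) (PySem.List.pyRepeat [(0 : Int)] b)
     else PySem.List.pyRepeat [(0 : Int)] b)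
    b (PySem.List.pyRepeat [Int.tdiv d b] b))

def pvAxisB (d b : Int) : List Int :=
  (PySem.List.pyRange 1 (b + 1) 1).map (fun m => m * Int.tdiv d b + min m (PySem.Int.mod d b))

lemma axis_eq (d b : Int) (hb : b ≠ 0) : pvAxisA d b = pvAxisB d b := by
  rcases lt_or_gt_of_ne hb with hneg | hpos
  · -- b < 0 : both sides are []
    have hrep : ∀ v : Int, PySem.List.pyRepeat [v] b = [] := by
      intro v
      rw [PySem.List.pyRepeat_singleton]
      have h0 : b.toNat = 0 := by omega
      rw [h0]; rfl
    have hx : (if PySem.Int.mod d b > 0 then pvStage1 (PySem.Int.mod d b) (PySem.List.pyRepeat [(0 : Int)] b)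
        else PySem.List.pyRepeat [(0 : Int)] b) = [] := by
      rw [hrep]
      split_ifs with h
      · exact foldl_pySetD_nil _ _
      · rfl
    unfold pvAxisA pvAxisB
    rw [hx, hrep, PySem.List.pyRange_one_eq_nil (by omega : b + 1 ≤ 1), List.map_nil]
    unfold pvStage2 pvStage3
    rw [foldl_pySetD_nil, foldl_pySetD_nil]
  · -- b > 0
    set n := b.toNat with hn
    have hbn : ((n : Nat) : Int) = b := by omega
    set r := PySem.Int.mod d b with hrdef
    have hre : r = d % b := PySem.Int.mod_eq_emod_of_pos hpos
    have hr0 : 0 ≤ r := by rw [hre]; exact Int.emod_nonneg d (by omega)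
    have hrb : r < b := by rw [hre]; exact Int.emod_lt_of_pos d hpos
    set m := r.toNat with hmdef
    have hm : ((m : Nat) : Int) = r := by omega
    have hmn : m ≤ n := by omega
    set i := Int.tdiv d b with hidef
    have hX0 : PySem.List.pyRepeat [(0 : Int)] b = List.replicate n (0 : Int) := by
      rw [PySem.List.pyRepeat_singleton]
    have hL0 : PySem.List.pyRepeat [i] b = List.replicate n i := by
      rw [PySem.List.pyRepeat_singleton]
    have hx : (if r > 0 then pvStage1 r (PySem.List.pyRepeat [(0 : Int)] b)
        else PySem.List.pyRepeat [(0 : Int)] b) = pvStage1 ((m : Nat) : Int) (List.replicate n (0 : Int)) := by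
      rw [hX0, hm]
      split_ifs with h
      · rfl
      · have hr00 : r = 0 := by omega
        rw [hr00]
        unfold pvStage1
        rw [PySem.List.pyRange_one_eq_nil (by omega : (0:Int) ≤ 0)]
        rfl
    set X := pvStage1 ((m : Nat) : Int) (List.replicate n (0 : Int)) with hXdef
    have hXlen : X.length = n := by
      rw [hXdef, stage1_len, List.length_replicate]
    have hXel : ∀ k (hk : k < n), X[k]'(by omega) = if k < m then 1 else 0 := by
      intro k hk
      have h1 := stage1_getElem (List.replicate n (0:Int)) m (by simpa using hmn) k (by simpa using hk)
      rw [h1]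
      split_ifs
      · rfl
      · simp
    set S2 := pvStage2 X ((n : Nat) : Int) (List.replicate n i) with hS2def
    have hS2len : S2.length = n := by rw [hS2def, stage2_len, List.length_replicate]
    have hS2el : ∀ k (hk : k < S2.length), S2[k] = i + (if (k : Int) < r then 1 else 0) := by
      intro k hk
      have hkn : k < n := by omega
      have h2 := stage2_getElem X (List.replicate n i) n (by simp) k (by simpa using hkn)
      simp only [List.getElem_replicate] at h2
      rw [if_pos hkn] at h2
      have hXg : X.getD k 0 = (if k < m then (1:Int) else 0) := by
        rw [List.getD_eq_getElem _ _ (by omega), hXel k hkn]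
      rw [hXg] at h2
      have hiter : (if (k:Int) < r then (1:Int) else 0) = (if k < m then 1 else 0) := by
        split_ifs with a c <;> omega
      rw [hiter]
      exact h2
    have h3 := stage3_getElem i r hr0 S2 hS2el n (by omega) (by omega)
    have hS3len : (pvStage3 ((n:Nat) : Int) S2).length = n := by rw [stage3_len]; omega
    have hB : pvAxisB d b = (List.range n).map (fun k : Nat => ((1:Int) + (k:Int)) * i + min ((1:Int) + (k:Int)) r) := by
      unfold pvAxisB
      rw [PySem.List.pyRange_one]
      have hlen2 : ((b + 1 - 1).toNat) = n := by omega
      rw [hlen2, List.map_map]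
      exact List.map_congr_left (fun a _ => rfl)
    have hA : pvAxisA d b = pvStage3 ((n : Nat) : Int) S2 := by
      unfold pvAxisA
      rw [← hrdef, ← hidef, hx, hL0, ← hbn]
    rw [hA, hB]
    apply List.ext_getElem
    · rw [hS3len, List.length_map, List.length_range]
    · intro k hk1 hk2
      rw [h3 k (by omega)]
      rw [if_pos (by omega)]
      simp only [List.getElem_map, List.getElem_range]
      have hc : (1:Int) + (k:Int) = (k:Int) + 1 := by omega
      rw [hc]

lemma parametre_eq_axis (dx dy bx bY : Int) :
    parametre dx dy bx bY = ([0] ++ pvAxisA dx bx, [0] ++ pvAxisA dy bY) := rfl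

lemma parametre_alt_eq_axis (dx dy bx bY : Int) :
    parametre_alt dx dy bx bY = ([0] ++ pvAxisB dx bx, [0] ++ pvAxisB dy bY) := rfl

-- ===== VERDICT (by name: the statement is the Claim_ definition above) =====
theorem parametre_spec : Claim_equal_parametre := by
  intro dx dy bx bY _ hpre
  unfold Spec_parametre
  rw [parametre_eq_axis, parametre_alt_eq_axis, axis_eq dx bx hpre.1, axis_eq dy bY hpre.2]
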